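-- pv_equiv track=rewrite | github.com/bansalsahab/AI-Driven-Customer-Support-Enhancing-Efficiency-Through-Multi-agents | utils/data_processor.py | segment_conversation
-- ===== SOURCE A (Python) =====
-- from typing import Dict, List, Any, Optional
--
-- def segment_conversation(conversation: Dict[str, Any]) -> List[Dict[str, Any]]:
--     """Segment conversation into meaningful parts"""
--     segments = []
--
--     if 'messages' in conversation:
--         current_segment = []
--         for msg in conversation['messages']:
--             current_segment.append(msg)
--
--             # Segment when customer sends a message after agent response
--             if (len(current_segment) >= 2 and
--                 current_segment[-1].get('sender') == 'Customer' and
--                 current_segment[-2].get('sender') == 'Agent'):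
--                 segments.append(current_segment.copy())
--                 current_segment = [msg]  # Start next segment with this message
--
--         # Add any remaining messages as a segment
--         if current_segment:
--             segments.append(current_segment)
--
--     return segments
-- ===== SOURCE B (Python) =====
-- def segment_conversation(conversation):
--     """Segment conversation into meaningful parts (two-phase: find boundaries, then slice)."""
--     msgs = conversation.get('messages')
--     if not msgs:
--         return []
--     boundaries = [i for i in range(1, len(msgs))
--                   if msgs[i].get('sender') == 'Customer'
--                   and msgs[i - 1].get('sender') == 'Agent']
--     segments = []
--     prev = 0
--     for b in boundaries:
--         segments.append(msgs[prev:b + 1])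
--         prev = b
--     segments.append(msgs[prev:])
--     return segments
-- ===== Notes on version B (the rewrite author's own statement) =====
-- stated objective: alternative
-- what changed: Replaces the single stateful loop that grows/resets a current_segment buffer with a two-phase index-then-slice decomposition: one scan collects the boundary indices (Customer right after Agent), then the segments are produced as overlapping slices of the message list.
import Mathlib
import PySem

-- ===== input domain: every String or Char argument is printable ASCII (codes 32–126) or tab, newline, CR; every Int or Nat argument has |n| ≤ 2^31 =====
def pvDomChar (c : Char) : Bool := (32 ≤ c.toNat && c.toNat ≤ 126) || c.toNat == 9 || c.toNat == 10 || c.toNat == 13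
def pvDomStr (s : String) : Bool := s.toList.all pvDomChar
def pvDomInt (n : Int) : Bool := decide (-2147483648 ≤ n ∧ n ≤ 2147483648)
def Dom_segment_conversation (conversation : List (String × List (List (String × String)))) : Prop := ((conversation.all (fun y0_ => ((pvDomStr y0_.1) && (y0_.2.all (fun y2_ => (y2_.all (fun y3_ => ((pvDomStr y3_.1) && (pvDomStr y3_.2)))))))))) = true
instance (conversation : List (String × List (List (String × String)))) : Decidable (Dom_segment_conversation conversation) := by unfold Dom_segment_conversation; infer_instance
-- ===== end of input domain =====

-- B replaces A's stateful grow/reset buffer loop by a two-phase index-then-slice decomposition (alternative, same cost).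


-- ===== PORT A =====
-- dict lookup (first match on the association list) = List.lookup
def segment_conversation (conversation : List (String × List (List (String × String)))) : List (List (List (String × String))) :=
  match List.lookup "messages" conversation with
  | none => []
  | some msgs =>
    let st := msgs.foldl (fun (st : List (List (List (String × String))) × List (List (String × String))) msg =>
      let cur := st.2 ++ [msg]
      if 2 ≤ cur.length ∧
         (PySem.List.pyGet? cur (-1)).bind (fun m => List.lookup "sender" m) = some "Customer" ∧
         (PySem.List.pyGet? cur (-2)).bind (fun m => List.lookup "sender" m) = some "Agent" then
        (st.1 ++ [cur], [msg])
      else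
        (st.1, cur)) ([], [])
    if st.2 = [] then st.1 else st.1 ++ [st.2]

-- ===== PORT B =====
def segment_conversation_alt (conversation : List (String × List (List (String × String)))) : List (List (List (String × String))) :=
  match List.lookup "messages" conversation with
  | none => []
  | some msgs =>
    if msgs = [] then [] else
    let boundaries := (PySem.List.pyRange 1 (msgs.length : Int) 1).filter (fun i =>
      ((PySem.List.pyGet? msgs i).bind (fun m => List.lookup "sender" m) == some "Customer") &&
      ((PySem.List.pyGet? msgs (i - 1)).bind (fun m => List.lookup "sender" m) == some "Agent"))
    let st := boundaries.foldl (fun (st : List (List (List (String × String))) × Int) b =>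
      (st.1 ++ [PySem.List.slice msgs (some st.2) (some (b + 1))], b)) ([], (0 : Int))
    st.1 ++ [PySem.List.slice msgs (some st.2) none]

-- ===== PRECONDITION & SPEC =====
def Spec_segment_conversation (conversation : List (String × List (List (String × String)))) (out : List (List (List (String × String)))) : Prop := out = segment_conversation_alt conversation
instance (conversation : List (String × List (List (String × String)))) (out : List (List (List (String × String)))) : Decidable (Spec_segment_conversation conversation out) := by unfold Spec_segment_conversation; infer_instance

-- ===== CLAIM (what is proved, stated in full; the proofs are below) =====
def Claim_equal_segment_conversation : Prop := ∀ (conversation : List (String × List (List (String × String)))), Dom_segment_conversation conversation → Spec_segment_conversation conversation (segment_conversation conversation)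

-- ===== LEMMAS AND PROOFS =====

-- abbreviations used only in the proofs
def sndr (m : List (String × String)) : Option String := List.lookup "sender" m

def condB (msgs : List (List (String × String))) (i : Int) : Bool :=
  ((PySem.List.pyGet? msgs i).bind (fun m => List.lookup "sender" m) == some "Customer") &&
  ((PySem.List.pyGet? msgs (i - 1)).bind (fun m => List.lookup "sender" m) == some "Agent")

-- common recursive specification of the segmentation, with cur the (nonempty) pending segment
def segGo (cur : List (List (String × String))) : List (List (String × String)) → List (List (List (String × String)))
  | [] => [cur]
  | m :: rest =>
    if (sndr m == some "Customer") && ((cur.getLast?.bind sndr) == some "Agent") then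
      (cur ++ [m]) :: segGo [m] rest
    else
      segGo (cur ++ [m]) rest

-- A's fold step in closed form
def stepA (st : List (List (List (String × String))) × List (List (String × String))) (msg : List (String × String)) :
    List (List (List (String × String))) × List (List (String × String)) :=
  let cur := st.2 ++ [msg]
  if 2 ≤ cur.length ∧
     (PySem.List.pyGet? cur (-1)).bind (fun m => List.lookup "sender" m) = some "Customer" ∧
     (PySem.List.pyGet? cur (-2)).bind (fun m => List.lookup "sender" m) = some "Agent" then
    (st.1 ++ [cur], [msg])
  else
    (st.1, cur)

theorem stepA_eq (segs : List (List (List (String × String)))) (cur : List (List (String × String)))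
    (m : List (String × String)) (h : cur ≠ []) :
    stepA (segs, cur) m =
      if (sndr m == some "Customer") && ((cur.getLast?.bind sndr) == some "Agent") then
        (segs ++ [cur ++ [m]], [m])
      else
        (segs, cur ++ [m]) := by
  have hlen : cur.length ≠ 0 := fun hl => h (List.length_eq_zero_iff.mp hl)
  have h1 : PySem.List.pyGet? (cur ++ [m]) (-1) = some m :=
    PySem.List.pyGet?_neg_one_append_singleton cur m
  have h2 : PySem.List.pyGet? (cur ++ [m]) (-2) = cur.getLast? := by
    rw [PySem.List.pyGet?_neg_ofNat (cur ++ [m]) 2 (by omega) (by simp; omega)]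
    rw [List.getLast?_eq_getElem?]
    simp only [List.length_append, List.length_cons, List.length_nil]
    rw [List.getElem?_append_left (by omega)]
    congr 1
  simp only [stepA, h1, h2, Option.bind_some, sndr]
  split_ifs with hp hb hb
  · rfl
  · exfalso; apply hb; simp only [Bool.and_eq_true, beq_iff_eq]
    exact ⟨hp.2.1, hp.2.2⟩
  · exfalso; apply hp
    simp only [Bool.and_eq_true, beq_iff_eq] at hb
    refine ⟨by simp [List.length_append]; omega, hb.1, hb.2⟩
  · rfl

theorem foldA_eq (msgs : List (List (String × String))) :
    ∀ (segs : List (List (List (String × String)))) (cur : List (List (String × String))), cur ≠ [] →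
    (let st := msgs.foldl stepA (segs, cur)
     if st.2 = [] then st.1 else st.1 ++ [st.2]) = segs ++ segGo cur msgs := by
  induction msgs with
  | nil =>
    intro segs cur h
    simp only [List.foldl_nil, segGo]
    rw [if_neg h]
  | cons m rest ih =>
    intro segs cur h
    simp only [List.foldl_cons, stepA_eq segs cur m h, segGo]
    by_cases hc : ((sndr m == some "Customer") && ((cur.getLast?.bind sndr) == some "Agent")) = true
    · rw [if_pos hc, if_pos hc, ih (segs ++ [cur ++ [m]]) [m] (by simp), List.append_assoc]
      rfl
    · rw [if_neg hc, if_neg hc, ih segs (cur ++ [m]) (by simp)]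

-- B's fold with a seed prefix
theorem foldB_prefix (msgs : List (List (String × String))) (bs : List Int)
    (segs : List (List (List (String × String)))) (prev : Int) :
    bs.foldl (fun (st : List (List (List (String × String))) × Int) b =>
        (st.1 ++ [PySem.List.slice msgs (some st.2) (some (b + 1))], b)) (segs, prev)
    = (segs ++ (bs.foldl (fun (st : List (List (List (String × String))) × Int) b =>
        (st.1 ++ [PySem.List.slice msgs (some st.2) (some (b + 1))], b)) ([], prev)).1,
       (bs.foldl (fun (st : List (List (List (String × String))) × Int) b =>
        (st.1 ++ [PySem.List.slice msgs (some st.2) (some (b + 1))], b)) ([], prev)).2) := by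
  induction bs generalizing segs prev with
  | nil => simp
  | cons b bs ih =>
    simp only [List.foldl_cons, List.nil_append]
    rw [ih (segs ++ [PySem.List.slice msgs (some prev) (some (b + 1))]) b,
        ih [PySem.List.slice msgs (some prev) (some (b + 1))] b]
    simp

def chunkOut (msgs : List (List (String × String))) (prev : Int) (bs : List Int) :
    List (List (List (String × String))) :=
  let st := bs.foldl (fun (st : List (List (List (String × String))) × Int) b =>
    (st.1 ++ [PySem.List.slice msgs (some st.2) (some (b + 1))], b)) ([], prev)
  st.1 ++ [PySem.List.slice msgs (some st.2) none]

theorem chunkOut_cons (msgs : List (List (String × String))) (prev b : Int) (bs : List Int) :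
    chunkOut msgs prev (b :: bs)
      = PySem.List.slice msgs (some prev) (some (b + 1)) :: chunkOut msgs b bs := by
  simp only [chunkOut, List.foldl_cons, List.nil_append]
  rw [foldB_prefix]
  simp

-- main bridge: from position k with pending segment msgs[j:k]
theorem main_bridge (msgs : List (List (String × String))) (d : Nat) :
    ∀ (k j : Nat), msgs.length - k = d → j < k → k ≤ msgs.length →
    segGo ((msgs.drop j).take (k - j)) (msgs.drop k)
      = chunkOut msgs (j : Int) (((PySem.List.pyRange (k : Int) (msgs.length : Int) 1)).filter (condB msgs)) := by
  induction d with
  | zero =>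
    intro k j hd hjk hk
    have hk' : k = msgs.length := by omega
    subst hk'
    have h1 : msgs.drop msgs.length = [] := by simp
    have h2 : (msgs.drop j).take (msgs.length - j) = msgs.drop j :=
      List.take_of_length_le (by simp)
    rw [h1, h2]
    simp only [segGo, chunkOut, PySem.List.pyRange_one_eq_nil (le_refl (msgs.length : Int)),
      List.filter_nil, List.foldl_nil, List.nil_append]
    rw [PySem.List.slice_from_natCast]
  | succ d ih =>
    intro k j hd hjk hk
    have hklt : k < msgs.length := by omega
    have hdropk : msgs.drop k = msgs[k] :: msgs.drop (k + 1) := List.drop_eq_getElem_cons hklt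
    have hcurlen : ((msgs.drop j).take (k - j)).length = k - j := by
      simp; omega
    have hlast : ((msgs.drop j).take (k - j)).getLast? = some msgs[k - 1] := by
      rw [List.getLast?_eq_getElem?, hcurlen, List.getElem?_take_of_lt (by omega),
        List.getElem?_drop]
      rw [show j + (k - j - 1) = k - 1 by omega]
      exact List.getElem?_eq_getElem (by omega)
    have hsucc : ∀ a : Nat, a ≤ k → (msgs.drop a).take (k + 1 - a) = (msgs.drop a).take (k - a) ++ [msgs[k]] := by
      intro a ha
      rw [show k + 1 - a = (k - a) + 1 by omega, List.take_add_one, List.getElem?_drop,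
        show a + (k - a) = k by omega, List.getElem?_eq_getElem hklt]
      rfl
    have hcond : condB msgs (k : Int) =
        ((sndr msgs[k] == some "Customer") &&
          ((((msgs.drop j).take (k - j)).getLast?.bind sndr) == some "Agent")) := by
      rw [hlast]
      simp only [condB, Option.bind_some, sndr]
      rw [show (k : Int) - 1 = ((k - 1 : Nat) : Int) by omega]
      rw [PySem.List.pyGet?_natCast, PySem.List.pyGet?_natCast,
        List.getElem?_eq_getElem hklt, List.getElem?_eq_getElem (by omega)]
      rfl
    have hrange : PySem.List.pyRange (k : Int) (msgs.length : Int) 1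
        = (k : Int) :: PySem.List.pyRange ((k : Int) + 1) (msgs.length : Int) 1 :=
      PySem.List.pyRange_one_cons (by exact_mod_cast hklt)
    rw [hdropk, hrange]
    simp only [List.filter_cons, segGo, hcond]
    by_cases hP : ((sndr msgs[k] == some "Customer") &&
          ((((msgs.drop j).take (k - j)).getLast?.bind sndr) == some "Agent")) = true
    · rw [if_pos hP, if_pos hP, chunkOut_cons]
      rw [show (k : Int) + 1 = ((k + 1 : Nat) : Int) by push_cast; ring, PySem.List.slice_natCast,
        hsucc j (by omega)]
      congr 1
      have h1 : [msgs[k]] = (msgs.drop k).take (k + 1 - k) := by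
        rw [show k + 1 - k = 1 by omega, hdropk]
        rfl
      rw [h1, show (k : Int) + 1 = ((k + 1 : Nat) : Int) by push_cast; ring] at *
      exact ih (k + 1) k (by omega) (by omega) (by omega)
    · rw [if_neg hP, if_neg hP, ← hsucc j (by omega)]
      rw [show (k : Int) + 1 = ((k + 1 : Nat) : Int) by push_cast; ring]
      exact ih (k + 1) j (by omega) (by omega) (by omega)

-- ===== VERDICT (by name: the statement is the Claim_ definition above) =====
theorem segment_conversation_spec : Claim_equal_segment_conversation := by
  intro conversation _
  unfold Spec_segment_conversation
  cases hkey : List.lookup "messages" conversation with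
  | none => simp [segment_conversation, segment_conversation_alt, hkey]
  | some msgs =>
    cases msgs with
    | nil => simp [segment_conversation, segment_conversation_alt, hkey]
    | cons m0 rest =>
      have hA : segment_conversation conversation = segGo [m0] rest := by
        simp only [segment_conversation, hkey]
        show (let st := (m0 :: rest).foldl stepA ([], [])
              if st.2 = [] then st.1 else st.1 ++ [st.2]) = _
        rw [List.foldl_cons, show stepA ([], []) m0 = ([], [m0]) by simp [stepA]]
        have := foldA_eq rest [] [m0] (by simp)
        simpa using this
      have hB : segment_conversation_alt conversation
          = chunkOut (m0 :: rest) ((0 : Nat) : Int)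
              ((PySem.List.pyRange ((1 : Nat) : Int) ((m0 :: rest).length : Int) 1).filter (condB (m0 :: rest))) := by
        simp only [segment_conversation_alt, hkey]
        rw [if_neg (by simp)]
        rfl
      rw [hA, hB, ← main_bridge (m0 :: rest) ((m0 :: rest).length - 1) 1 0 (by simp) (by omega) (by simp)]
      rfl
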